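-- pv_equiv track=rewrite | github.com/Kenta57/sort | src/shell_sort.py | make_G
-- ===== SOURCE A (Python) =====
-- from typing import List
--
-- def generator():
--     x = 1
--     while True:
--         yield x
--         x = 3*x + 1
--
-- def make_G(n:int) -> List:
--     a = generator()
--     l = []
--     v = next(a)
--     while n > v:
--         l.append(v)
--         v = next(a)
--     return l
-- ===== SOURCE B (Python) =====
-- def make_G(n: int):
--     # phase 1: count how many gaps are below n
--     m = 0
--     while (3 ** (m + 1) - 1) // 2 < n:
--         m += 1
--     # phase 2: build the list from the indices
--     return [(3 ** k - 1) // 2 for k in range(1, m + 1)]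
-- ===== Notes on version B (the rewrite author's own statement) =====
-- stated objective: alternative
-- what changed: Replaces the generator carrying the recurrence x=3x+1 with two staged passes: first count the gaps via the closed form (3**k-1)//2, then build the list with a comprehension over range(1, m+1).
import Mathlib
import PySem

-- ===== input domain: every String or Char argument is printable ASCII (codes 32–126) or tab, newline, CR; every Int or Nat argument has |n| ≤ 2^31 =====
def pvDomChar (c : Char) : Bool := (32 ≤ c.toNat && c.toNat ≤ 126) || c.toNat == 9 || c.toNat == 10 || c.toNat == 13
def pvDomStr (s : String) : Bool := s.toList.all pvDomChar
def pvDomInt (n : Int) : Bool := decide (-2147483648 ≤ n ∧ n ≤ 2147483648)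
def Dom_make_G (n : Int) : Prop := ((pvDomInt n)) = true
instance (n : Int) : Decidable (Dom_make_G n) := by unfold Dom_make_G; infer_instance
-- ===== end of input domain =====

-- B replaces A's generator carrying the recurrence x = 3x+1 with two staged passes:
-- count the gaps via the closed form (3^k - 1) // 2, then build the list by a
-- comprehension over range(1, m+1). No speed claim. Each while-loop is ported with a
-- fuel counter (n.toNat + 1 strictly exceeds its iteration count, since A's loop value
-- and B's (m+1)-th term both exceed the iteration index).

-- ===== PORT A =====
-- A's while-loop: v runs through the generator values 1, 3v+1, …; append while n > v.
def pvLoopA (fuel : Nat) (n v : Int) : List Int :=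
  match fuel with
  | 0 => []
  | f + 1 => if n > v then v :: pvLoopA f n (3 * v + 1) else []

def make_G (n : Int) : List Int := pvLoopA (n.toNat + 1) n 1

-- ===== PORT B =====
-- Source B's k-th gap (3**k - 1) // 2: the numerator is nonnegative, so Lean's Int
-- division agrees with Python's // here.
def pvTerm (k : Nat) : Int := (3 ^ k - 1) / 2

-- Source B's counting while-loop.
def pvCount (fuel : Nat) (n : Int) (m : Nat) : Nat :=
  match fuel with
  | 0 => m
  | f + 1 => if pvTerm (m + 1) < n then pvCount f n (m + 1) else m

-- Source B: count, then comprehension over range(1, m+1).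
def make_G_alt (n : Int) : List Int :=
  let m := pvCount (n.toNat + 1) n 0
  (PySem.List.pyRange 1 ((m : Int) + 1) 1).map (fun k => (3 ^ k.toNat - 1) / 2)

-- ===== PRECONDITION & SPEC =====
def Spec_make_G (n : Int) (out : List Int) : Prop := out = make_G_alt n
instance (n : Int) (out : List Int) : Decidable (Spec_make_G n out) := by unfold Spec_make_G; infer_instance

-- ===== CLAIM (what is proved, stated in full; the proofs are below) =====
def Claim_equal_make_G : Prop := ∀ (n : Int), Dom_make_G n → Spec_make_G n (make_G n)

-- ===== LEMMAS AND PROOFS =====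

theorem pvTerm_succ (k : Nat) : pvTerm (k + 1) = 3 * pvTerm k + 1 := by
  obtain ⟨m, hm⟩ := (Odd.pow (by decide : Odd (3 : Int)) (n := k))
  simp only [pvTerm, pow_succ]
  omega

theorem pvCount_ge (fuel : Nat) (n : Int) (m : Nat) : m ≤ pvCount fuel n m := by
  induction fuel generalizing m with
  | zero => simp [pvCount]
  | succ f ih =>
      simp only [pvCount]
      split
      · exact Nat.le_trans (Nat.le_succ m) (ih (m + 1))
      · exact Nat.le_refl m

theorem loopA_eq_range' (fuel : Nat) (n : Int) (j : Nat) :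
    pvLoopA fuel n (pvTerm (j + 1)) =
      (List.range' (j + 1) (pvCount fuel n j - j)).map pvTerm := by
  induction fuel generalizing j with
  | zero => simp [pvLoopA, pvCount]
  | succ f ih =>
      simp only [pvLoopA, pvCount]
      by_cases h : pvTerm (j + 1) < n
      · rw [if_pos h, if_pos h]
        have hge := pvCount_ge f n (j + 1)
        have hlen : pvCount f n (j + 1) - j = (pvCount f n (j + 1) - (j + 1)) + 1 := by
          omega
        rw [hlen, List.range'_succ, List.map_cons, ← pvTerm_succ (j + 1), ih (j + 1)]
      · rw [if_neg (by omega : ¬ n > pvTerm (j + 1)), if_neg h]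
        simp

theorem pyRange_map_term (m : Nat) :
    (PySem.List.pyRange 1 ((m : Int) + 1) 1).map (fun k => ((3 : Int) ^ k.toNat - 1) / 2) =
      (List.range' 1 m).map pvTerm := by
  rw [PySem.List.pyRange_one, List.range'_eq_map_range, List.map_map, List.map_map]
  have h1 : ((m : Int) + 1 - 1).toNat = m := by omega
  rw [h1]
  apply List.map_congr_left
  intro k _
  simp only [Function.comp_apply, pvTerm]
  congr 2

-- ===== VERDICT (by name: the statement is the Claim_ definition above) =====
theorem make_G_spec : Claim_equal_make_G := by
  intro n _
  unfold Spec_make_G make_G make_G_alt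
  rw [pyRange_map_term]
  have h1 : pvTerm 1 = 1 := by decide
  have := loopA_eq_range' (n.toNat + 1) n 0
  rw [h1] at this
  simpa using this
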